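-- pv_equiv track=rewrite | github.com/salemileandro/pparserpy | pyrserpp/utils.py | split_str_list
-- ===== SOURCE A (Python) =====
-- def split_str_list(str_list: list, n_elem_max: int, split_char: str = " ") -> list:
--     """
--     Split each element of a list of string "str_list" according to the "split_char". The number of elements of
--     each line will be >= n_elem_max. If the split lead to more elements, then the last elements are concatanated
--     using spaces as separator.
--
--     :param str_list: list
--         List of string to be split
--     :param n_elem_max: int
--         Maximum number of elements in each line of the list
--     :param split_char: str
--         Splitting character
--     :return: list
--         List of list of string of split sentences
--     """
--
--     for i in range(0, len(str_list)):
--         str_list[i] = list(filter(None, str_list[i].split(split_char)))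
--         tmp = []
--         for j in range(len(str_list[i])):
--             if j == n_elem_max - 1:
--                 s = ""
--                 for k in range(j, len(str_list[i])):
--                     s += str_list[i][k] + " "
--                 s = s.strip(" ")
--                 tmp.append(s)
--                 break
--             else:
--                 tmp.append(str_list[i][j])
--         str_list[i] = tmp
--
--     return str_list
-- ===== SOURCE B (Python) =====
-- def split_str_list(str_list: list, n_elem_max: int, split_char: str = " ") -> list:
--     c = n_elem_max - 1
--     for i, s in enumerate(str_list):
--         tokens = [t for t in s.split(split_char) if t]
--         if 0 <= c < len(tokens):
--             tokens = tokens[:c] + [" ".join(tokens[c:]).strip(" ")]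
--         str_list[i] = tokens
--     return str_list
-- ===== Notes on version B (the rewrite author's own statement) =====
-- stated objective: simpler
-- what changed: Replaces the per-index append loop with its break and the character-by-character '+=' tail accumulation by slicing the token list at n_elem_max-1 and joining the tail with a single ' '.join, guarded by one range test on the cut index.
import Mathlib
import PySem

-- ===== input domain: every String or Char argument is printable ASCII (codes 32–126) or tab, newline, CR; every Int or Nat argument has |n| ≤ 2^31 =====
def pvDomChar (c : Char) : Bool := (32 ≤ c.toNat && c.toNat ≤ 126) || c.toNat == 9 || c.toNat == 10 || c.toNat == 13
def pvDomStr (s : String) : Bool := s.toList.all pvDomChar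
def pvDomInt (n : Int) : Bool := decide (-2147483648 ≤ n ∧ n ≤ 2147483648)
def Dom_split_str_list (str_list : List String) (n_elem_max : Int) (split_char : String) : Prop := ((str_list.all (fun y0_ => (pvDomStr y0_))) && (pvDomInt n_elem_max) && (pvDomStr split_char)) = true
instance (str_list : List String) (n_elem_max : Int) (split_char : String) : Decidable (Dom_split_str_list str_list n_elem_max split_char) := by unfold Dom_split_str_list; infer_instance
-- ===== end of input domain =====

-- B replaces A's index loop with break and '+=' tail accumulation by slicing at
-- n_elem_max-1 and joining the tail with a single join (objective: simpler).
-- Both A and B mutate str_list in place in Python in the same way; the theorem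
-- is about the returned value.

-- ===== PORT A =====
-- A's innermost k-loop: s = ""; for k in range(j, len(toks)): s += toks[k] + " "
def pvAConcat (toks : List String) (j : Nat) : List Char :=
  (toks.drop j).foldl (fun s t => s ++ t.toList ++ [' ']) []

-- A's j-loop building tmp, with the break at j == n_elem_max - 1
def pvALoop (toks : List String) (n_elem_max : Int) (j : Nat) (tmp : List String) : List String :=
  if h : j < toks.length then
    if (j : Int) = n_elem_max - 1 then
      tmp ++ [String.ofList (PySem.Chars.stripChars (pvAConcat toks j) [' '])]
    else pvALoop toks n_elem_max (j + 1) (tmp ++ [toks[j]])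
  else tmp
termination_by toks.length - j

def split_str_list (str_list : List String) (n_elem_max : Int) (split_char : String) : List (List String) :=
  str_list.map (fun s =>
    match PySem.Str.split? s split_char with
    | none => []   -- unreachable under Pre_ (split_char ≠ "")
    | some parts =>
      let toks := parts.filter (fun t => t ≠ "")   -- list(filter(None, …))
      pvALoop toks n_elem_max 0 [])

-- ===== PORT B =====
def pvBElem (s : String) (n_elem_max : Int) (split_char : String) : List String :=
  match PySem.Str.split? s split_char with
  | none => []   -- unreachable under Pre_ (split_char ≠ "")
  | some parts =>
    let toks := parts.filter (fun t => t ≠ "")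
    let c := n_elem_max - 1
    if 0 ≤ c ∧ c < (toks.length : Int) then
      toks.take c.toNat ++ [PySem.Str.stripChars (PySem.Str.join " " (toks.drop c.toNat)) " "]
    else toks

def split_str_list_alt (str_list : List String) (n_elem_max : Int) (split_char : String) : List (List String) :=
  str_list.map (fun s => pvBElem s n_elem_max split_char)

-- ===== PRECONDITION & SPEC =====
-- Pre_ excludes only inputs where Python's str.split raises ValueError in A (and in B):
-- split_char = "" with a nonempty str_list (with str_list = [] the loop never runs and A returns []).
def Pre_split_str_list (str_list : List String) (n_elem_max : Int) (split_char : String) : Prop :=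
  split_char ≠ "" ∨ str_list = []
instance (str_list : List String) (n_elem_max : Int) (split_char : String) : Decidable (Pre_split_str_list str_list n_elem_max split_char) := by unfold Pre_split_str_list; infer_instance
def pvWitness_split_str_list : List String × Int × String := (["one two three", " a  b "], 2, " ")

def Spec_split_str_list (str_list : List String) (n_elem_max : Int) (split_char : String) (out : List (List String)) : Prop := out = split_str_list_alt str_list n_elem_max split_char
instance (str_list : List String) (n_elem_max : Int) (split_char : String) (out : List (List String)) : Decidable (Spec_split_str_list str_list n_elem_max split_char out) := by unfold Spec_split_str_list; infer_instance

-- ===== CLAIM (what is proved, stated in full; the proofs are below) =====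
def Claim_equal_split_str_list : Prop := ∀ (str_list : List String) (n_elem_max : Int) (split_char : String), Dom_split_str_list str_list n_elem_max split_char → Pre_split_str_list str_list n_elem_max split_char → Spec_split_str_list str_list n_elem_max split_char (split_str_list str_list n_elem_max split_char)

-- ===== LEMMAS AND PROOFS =====

-- A's '+=' accumulation is flatMap of (token ++ " ")
theorem pvAConcat_eq_flatMap (toks : List String) (j : Nat) :
    pvAConcat toks j = (toks.drop j).flatMap (fun t => t.toList ++ [' ']) := by
  unfold pvAConcat
  have h := PySem.List.foldl_append_eq_flatMap (fun t : String => t.toList ++ [' ']) (toks.drop j) []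
  simpa [List.append_assoc] using h

theorem pv_flatMap_eq_join (ts : List String) (h : ts ≠ []) :
    ts.flatMap (fun t => t.toList ++ [' ']) =
      PySem.Chars.join [' '] (ts.map String.toList) ++ [' '] := by
  induction ts with
  | nil => exact absurd rfl h
  | cons t ts ih =>
    cases ts with
    | nil => simp [PySem.Chars.join, List.intercalate]
    | cons u us =>
      simp only [List.flatMap_cons] at *
      rw [ih (by simp)]
      simp [PySem.Chars.join, List.intercalate]

theorem pv_strip_append_space (x : List Char) :
    PySem.Chars.stripChars (x ++ [' ']) [' '] = PySem.Chars.stripChars x [' '] := by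
  unfold PySem.Chars.stripChars
  dsimp only
  rw [List.dropWhile_append]
  cases hd : (List.dropWhile (fun c => ([' '] : List Char).contains c) x).isEmpty
  case false =>
    rw [if_neg (by simp), List.reverse_append, List.reverse_singleton,
        List.singleton_append, List.dropWhile_cons, if_pos (by decide)]
  case true =>
    rw [if_pos rfl]
    have h1 : List.dropWhile (fun c => ([' '] : List Char).contains c) [' '] = [] := by decide
    rw [h1, List.isEmpty_iff.mp hd]

-- the (j = n_elem_max - 1) branch string equals B's joined-and-stripped tail
theorem pv_break_string (toks : List String) (c : Nat) (hc : c < toks.length) :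
    String.ofList (PySem.Chars.stripChars (pvAConcat toks c) [' ']) =
      PySem.Str.stripChars (PySem.Str.join " " (toks.drop c)) " " := by
  have hne : toks.drop c ≠ [] := by
    simp [List.drop_eq_nil_iff]; omega
  rw [pvAConcat_eq_flatMap, pv_flatMap_eq_join _ hne, pv_strip_append_space]
  simp [PySem.Str.stripChars, PySem.Str.join, String.toList_ofList]

-- A's j-loop when the cut index is never reached: copies the remaining tokens
theorem pvALoop_all (toks : List String) (n : Int)
    (h : n - 1 < 0 ∨ (toks.length : Int) ≤ n - 1) :
    ∀ j tmp, pvALoop toks n j tmp = tmp ++ toks.drop j := by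
  intro j
  induction hj : toks.length - j using Nat.strong_induction_on generalizing j with
  | _ d ih =>
    intro tmp
    unfold pvALoop
    split
    · rename_i hlt
      have hne : ((j : Int) = n - 1) = False := by
        simp; rcases h with h | h <;> omega
      simp only [hne, if_false]
      rw [ih (toks.length - (j+1)) (by omega) (j+1) rfl]
      rw [List.drop_eq_getElem_cons hlt]
      simp
    · rename_i hge
      have : toks.drop j = [] := by simp [List.drop_eq_nil_iff]; omega
      simp [this]

-- A's j-loop up to the cut: first tokens then the joined tail
theorem pvALoop_cut (toks : List String) (n : Int) (c : Nat)
    (hcn : (c : Int) = n - 1) (hlt : c < toks.length) :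
    ∀ j tmp, j ≤ c →
      pvALoop toks n j tmp = tmp ++ (toks.drop j).take (c - j) ++
        [PySem.Str.stripChars (PySem.Str.join " " (toks.drop c)) " "] := by
  intro j
  induction hj : c - j using Nat.strong_induction_on generalizing j with
  | _ d ih =>
    intro tmp hjc
    unfold pvALoop
    rcases eq_or_lt_of_le hjc with heq | hlt2
    · subst heq
      have hd0 : d = 0 := by omega
      subst hd0
      simp only [dif_pos hlt, hcn, if_true]
      rw [pv_break_string toks j hlt]
      simp
    · have hjl : j < toks.length := by omega
      have hne : ((j : Int) = n - 1) = False := by simp; omega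
      simp only [dif_pos hjl, hne, if_false]
      rw [ih (c - (j + 1)) (by omega) (j + 1) rfl _ (by omega)]
      rw [List.drop_eq_getElem_cons hjl]
      have hd : d = (c - (j + 1)) + 1 := by omega
      rw [hd, List.take_succ_cons]
      simp

theorem pv_elem_eq (toks : List String) (n : Int) :
    pvALoop toks n 0 [] =
      (if 0 ≤ n - 1 ∧ n - 1 < (toks.length : Int) then
        toks.take (n - 1).toNat ++
          [PySem.Str.stripChars (PySem.Str.join " " (toks.drop (n - 1).toNat)) " "]
      else toks) := by
  split
  · rename_i h
    have hcn : ((n - 1).toNat : Int) = n - 1 := Int.toNat_of_nonneg h.1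
    have hlt : (n - 1).toNat < toks.length := by omega
    rw [pvALoop_cut toks n (n - 1).toNat hcn hlt 0 [] (Nat.zero_le _)]
    simp
  · rename_i h
    rw [pvALoop_all toks n (by omega) 0 []]
    simp

-- ===== VERDICT (by name: the statement is the Claim_ definition above) =====
theorem split_str_list_spec : Claim_equal_split_str_list := by
  intro str_list n_elem_max split_char _ _
  unfold Spec_split_str_list split_str_list split_str_list_alt pvBElem
  apply List.map_congr_left
  intro s _
  cases PySem.Str.split? s split_char with
  | none => rfl
  | some parts =>
    simp only
    rw [pv_elem_eq]
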